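-- pv_equiv track=rewrite | github.com/knyazevi81/aslan-new-year | app/services/expression.py | _wrap_numbers_as_decimal
-- ===== SOURCE A (Python) =====
-- def _wrap_numbers_as_decimal(expr: str) -> str:
--     """
--     Replace numeric literals outside strings with Decimal('...').
--     Supports ints and decimals like 0.015.
--     """
--     out = []
--     i = 0
--     in_str = False
--     while i < len(expr):
--         ch = expr[i]
--         if ch == "'" and (i == 0 or expr[i - 1] != "\\"):
--             in_str = not in_str
--             out.append(ch)
--             i += 1
--             continue
--         if in_str:
--             out.append(ch)
--             i += 1
--             continue
--         if ch.isdigit():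
--             j = i
--             while j < len(expr) and (expr[j].isdigit() or expr[j] == "."):
--                 j += 1
--             token = expr[i:j]
--             out.append(f"Decimal('{token}')")
--             i = j
--             continue
--         out.append(ch)
--         i += 1
--     return "".join(out)
-- ===== SOURCE B (Python) =====
-- import re
--
-- def _wrap_numbers_as_decimal(expr: str) -> str:
--     # Split expr into alternating code/string segments (toggling on an
--     # unescaped ', same naive rule as the original), then wrap number runs
--     # in the code segments with one regex substitution each.
--     segments = []  # list of (is_string, text)
--     cur = []
--     in_str = False
--     for i, ch in enumerate(expr):
--         if ch == "'" and (i == 0 or expr[i - 1] != "\\"):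
--             if in_str:
--                 cur.append(ch)
--                 segments.append((True, "".join(cur)))
--                 cur = []
--             else:
--                 segments.append((False, "".join(cur)))
--                 cur = [ch]
--             in_str = not in_str
--         else:
--             cur.append(ch)
--     segments.append((in_str, "".join(cur)))
--     return "".join(
--         text if is_str else re.sub(r"\d[\d.]*",
--                                    lambda m: f"Decimal('{m.group()}')", text)
--         for is_str, text in segments
--     )
-- ===== Notes on version B (the rewrite author's own statement) =====
-- stated objective: idiomatic
-- what changed: B first splits the expression into alternating code/string segments (one pass with A's naive quote-toggle rule), then wraps each greedy digits-and-dots run in the code segments via a single re.sub call per segment and joins, instead of A's single interleaved character loop with a manual inner digit-scanning while-loop.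
import Mathlib
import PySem

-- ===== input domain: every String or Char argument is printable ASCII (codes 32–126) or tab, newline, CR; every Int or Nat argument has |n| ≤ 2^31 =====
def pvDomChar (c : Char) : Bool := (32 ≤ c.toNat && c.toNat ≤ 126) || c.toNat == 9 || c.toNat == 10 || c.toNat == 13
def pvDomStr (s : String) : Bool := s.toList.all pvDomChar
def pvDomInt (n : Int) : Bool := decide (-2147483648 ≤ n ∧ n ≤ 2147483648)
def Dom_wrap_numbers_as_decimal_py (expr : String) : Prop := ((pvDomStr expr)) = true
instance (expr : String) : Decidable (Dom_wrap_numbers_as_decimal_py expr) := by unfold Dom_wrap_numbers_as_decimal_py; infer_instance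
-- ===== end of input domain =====

-- B splits the expression into string/code segments first, then wraps number
-- runs per code segment (regex in Python); same result, different decomposition.


-- ===== PORT A =====
-- Python's ch.isdigit() is Char.isDigit on the ASCII domain (exact there).
-- The while loop is the recursion below; 'i == 0 or expr[i-1] != "\\"' is
-- tracked by carrying the previous character (none at the start); the inner
-- number-scanning while loop is the takeWhile/drop pair over the SAME chars.
def aLoop (prev : Option Char) (instr : Bool) : List Char → List Char
  | [] => []
  | c :: rest =>
    if c = '\'' ∧ prev ≠ some '\\' then
      c :: aLoop (some c) (!instr) rest
    else if instr then
      c :: aLoop (some c) instr rest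
    else if c.isDigit then
      let t := rest.takeWhile (fun d => d.isDigit || d = '.')
      "Decimal('".toList ++ (c :: t) ++ "')".toList ++
        aLoop (some (t.getLastD c)) instr (rest.drop t.length)
    else
      c :: aLoop (some c) instr rest
termination_by l => l.length
decreasing_by all_goals (simp_all; try omega)

def wrap_numbers_as_decimal_py (expr : String) : String :=
  String.ofList (aLoop none false expr.toList)

-- ===== PORT B =====
-- Hand port of re.sub(r"\d[\d.]*", lambda m: f"Decimal('{m.group()}')", text):
-- exact for this pattern (leftmost match at a digit, greedy run of digits/dots).
def reSub : List Char → List Char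
  | [] => []
  | c :: cs =>
    if c.isDigit then
      let t := cs.takeWhile (fun d => d.isDigit || d = '.')
      "Decimal('".toList ++ (c :: t) ++ "')".toList ++ reSub (cs.drop t.length)
    else
      c :: reSub cs
termination_by l => l.length
decreasing_by all_goals (simp_all; try omega)

-- Source B's segmentation loop: cur accumulates the current segment, a toggling
-- quote closes it (closing quote kept in the string segment, opening quote
-- starts the next); the trailing segment keeps the final in_str flag.
def segsAux (prev : Option Char) (instr : Bool) (cur : List Char) : List Char → List (Bool × List Char)
  | [] => [(instr, cur)]
  | c :: rest =>
    if c = '\'' ∧ prev ≠ some '\\' then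
      if instr then (true, cur ++ [c]) :: segsAux (some c) false [] rest
      else (false, cur) :: segsAux (some c) true [c] rest
    else
      segsAux (some c) instr (cur ++ [c]) rest

-- Source B's final join: string segments untouched, code segments regex-wrapped.
def renderSegs (segments : List (Bool × List Char)) : List Char :=
  (segments.map (fun s => if s.1 then s.2 else reSub s.2)).flatten

def wrap_numbers_as_decimal_py_alt (expr : String) : String :=
  String.ofList (renderSegs (segsAux none false [] expr.toList))

-- ===== PRECONDITION & SPEC =====
def Spec_wrap_numbers_as_decimal_py (expr : String) (out : String) : Prop := out = wrap_numbers_as_decimal_py_alt expr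
instance (expr : String) (out : String) : Decidable (Spec_wrap_numbers_as_decimal_py expr out) := by unfold Spec_wrap_numbers_as_decimal_py; infer_instance

-- ===== CLAIM (what is proved, stated in full; the proofs are below) =====
def Claim_equal_wrap_numbers_as_decimal_py : Prop := ∀ (expr : String), Dom_wrap_numbers_as_decimal_py expr → Spec_wrap_numbers_as_decimal_py expr (wrap_numbers_as_decimal_py expr)

-- ===== LEMMAS AND PROOFS =====

theorem renderSegs_cons (b : Bool) (s : List Char) (S : List (Bool × List Char)) :
    renderSegs ((b, s) :: S) = (if b then s else reSub s) ++ renderSegs S := by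
  simp [renderSegs]

-- prepend a chunk onto the first segment of a segment list
def prependFirst (cs : List Char) : List (Bool × List Char) → List (Bool × List Char)
  | [] => []
  | (b, s) :: S => (b, cs ++ s) :: S

-- the accumulator only prefixes the first produced segment
theorem segsAux_flush (l : List Char) : ∀ (prev : Option Char) (instr : Bool) (cur₁ cur₂ : List Char),
    segsAux prev instr (cur₁ ++ cur₂) l = prependFirst cur₁ (segsAux prev instr cur₂ l) := by
  induction l with
  | nil => intro prev instr cur₁ cur₂; simp [segsAux, prependFirst]
  | cons c rest ih =>
    intro prev instr cur₁ cur₂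
    by_cases h : c = '\'' ∧ prev ≠ some '\\'
    · by_cases hi : instr <;> simp [segsAux, h, hi, prependFirst]
    · simpa [segsAux, h, List.append_assoc] using ih (some c) instr cur₁ (cur₂ ++ [c])

-- the first segment carries the current flag and a prefix of the input
theorem segsAux_head (l : List Char) : ∀ (prev : Option Char) (instr : Bool) (cur : List Char),
    ∃ s S, segsAux prev instr cur l = (instr, cur ++ s) :: S ∧ s <+: l := by
  induction l with
  | nil => intro prev instr cur; exact ⟨[], [], by simp [segsAux], List.nil_prefix⟩
  | cons c rest ih =>
    intro prev instr cur
    by_cases h : c = '\'' ∧ prev ≠ some '\\'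
    · by_cases hi : instr
      · exact ⟨[c], segsAux (some c) false [] rest, by simp [segsAux, h, hi],
          (List.prefix_cons_inj c).mpr List.nil_prefix⟩
      · exact ⟨[], segsAux (some c) true [c] rest, by simp [segsAux, h, hi], List.nil_prefix⟩
    · obtain ⟨s, S, he, hp⟩ := ih (some c) instr (cur ++ [c])
      exact ⟨c :: s, S, by simp [segsAux, h, he], (List.prefix_cons_inj c).mpr hp⟩

-- combined head/flush form used by the main induction
theorem render_flush (l : List Char) (prev : Option Char) (instr : Bool) (cur : List Char) :
    ∃ s S, segsAux prev instr [] l = (instr, s) :: S ∧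
      segsAux prev instr cur l = (instr, cur ++ s) :: S ∧ s <+: l := by
  obtain ⟨s, S, he, hp⟩ := segsAux_head l prev instr []
  refine ⟨s, S, by simpa using he, ?_, hp⟩
  have := segsAux_flush l prev instr cur []
  rw [List.append_nil] at this
  rw [this, he]
  simp [prependFirst]

-- toggle-free chunks just accumulate into cur
theorem segsAux_consume (ds : List Char) : ∀ (m : List Char) (prev : Option Char) (instr : Bool) (cur : List Char),
    (∀ d ∈ ds, d ≠ '\'') →
    segsAux prev instr cur (ds ++ m) =
      segsAux (ds.foldl (fun _ d => some d) prev) instr (cur ++ ds) m := by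
  induction ds with
  | nil => intro m prev instr cur _; simp
  | cons d ds ih =>
    intro m prev instr cur h
    have hd : ¬ (d = '\'' ∧ prev ≠ some '\\') := by
      intro hx; exact h d (List.mem_cons_self ..) hx.1
    simpa [segsAux, hd, List.append_assoc] using
      ih m (some d) instr (cur ++ [d]) (fun x hx => h x (List.mem_cons_of_mem _ hx))

theorem foldl_last (t : List Char) : ∀ (c : Char),
    t.foldl (fun _ d => some d) (some c) = some (t.getLastD c) := by
  induction t with
  | nil => intro c; simp
  | cons d t ih => intro c; rw [List.foldl_cons, ih d, List.getLastD_cons]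

-- takeWhile/drop decomposition facts (proved directly to keep names local)
theorem tw_split {p : Char → Bool} (l : List Char) :
    l.takeWhile p ++ l.drop (l.takeWhile p).length = l := by
  induction l with
  | nil => simp
  | cons c rest ih => by_cases h : p c <;> simp [h, ih]

theorem tw_drop_nil {p : Char → Bool} (l : List Char) :
    (l.drop (l.takeWhile p).length).takeWhile p = [] := by
  induction l with
  | nil => simp
  | cons c rest ih => by_cases h : p c <;> simp [h, ih]

theorem tw_nil_of_prefix {p : Char → Bool} {s l : List Char}
    (hl : l.takeWhile p = []) (hp : s <+: l) : s.takeWhile p = [] := by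
  cases s with
  | nil => simp
  | cons c s' =>
    obtain ⟨t, ht⟩ := hp
    by_cases hpc : p c
    · rw [← ht, List.cons_append, List.takeWhile_cons, if_pos hpc] at hl
      exact absurd hl (by simp)
    · simp [hpc]

theorem tw_append {p : Char → Bool} (xs : List Char) : ∀ ys : List Char,
    (∀ x ∈ xs, p x) → ys.takeWhile p = [] → (xs ++ ys).takeWhile p = xs := by
  induction xs with
  | nil => intro ys _ h; simpa using h
  | cons x xs ih =>
    intro ys hall h
    rw [List.cons_append, List.takeWhile_cons, if_pos (hall x (List.mem_cons_self ..)),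
      ih ys (fun a ha => hall a (List.mem_cons_of_mem _ ha)) h]

-- main invariant: A's interleaved loop equals B's segment-then-render pipeline
theorem main_inv : ∀ (n : Nat) (l : List Char), l.length ≤ n → ∀ (prev : Option Char) (instr : Bool),
    aLoop prev instr l = renderSegs (segsAux prev instr [] l) := by
  intro n
  induction n with
  | zero =>
    intro l hl prev instr
    have : l = [] := List.eq_nil_of_length_eq_zero (Nat.le_zero.mp hl)
    subst this; simp [aLoop, segsAux, renderSegs, reSub]
  | succ n ih =>
    intro l hl prev instr
    match l with
    | [] => simp [aLoop, segsAux, renderSegs, reSub]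
    | c :: rest =>
      have hr : rest.length ≤ n := by simpa using hl
      by_cases h : c = '\'' ∧ prev ≠ some '\\'
      · by_cases hi : instr
        · -- closing quote of a string segment
          subst hi
          rw [aLoop, segsAux, if_pos h, if_pos h]
          simp [renderSegs_cons, ih rest hr (some c) false]
        · -- opening quote of a string segment
          simp only [Bool.not_eq_true] at hi; subst hi
          obtain ⟨s, S, h0, hcur, _⟩ := render_flush rest (some c) true [c]
          rw [aLoop, segsAux, if_pos h, if_pos h]
          simp [hcur, h0, renderSegs_cons, ih rest hr (some c) true, reSub]
      · by_cases hi : instr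
        · -- inside a string: copy the character
          subst hi
          obtain ⟨s, S, h0, hcur, _⟩ := render_flush rest (some c) true [c]
          rw [aLoop, segsAux, if_neg h, if_neg h]
          simp [hcur, h0, renderSegs_cons, ih rest hr (some c) true]
        · simp only [Bool.not_eq_true] at hi; subst hi
          by_cases hd : c.isDigit
          · -- code mode, digit: A scans the run; B's segment keeps it whole
            have hlen : (rest.drop (rest.takeWhile (fun d => d.isDigit || d = '.')).length).length ≤ n := by
              simp only [List.length_drop]; omega
            obtain ⟨s, S, h0, hcur, hpre⟩ :=
              render_flush (rest.drop (rest.takeWhile (fun d => d.isDigit || d = '.')).length)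
                (some ((rest.takeWhile (fun d => d.isDigit || d = '.')).getLastD c)) false
                (c :: rest.takeWhile (fun d => d.isDigit || d = '.'))
            have hall : ∀ d ∈ rest.takeWhile (fun d => d.isDigit || d = '.'), d ≠ '\'' := by
              intro d hdm heq
              have := List.mem_takeWhile_imp hdm
              subst heq; simp at this
            have hcons := segsAux_consume (rest.takeWhile (fun d => d.isDigit || d = '.'))
              (rest.drop (rest.takeWhile (fun d => d.isDigit || d = '.')).length)
              (some c) false [c] hall
            rw [foldl_last, tw_split] at hcons
            have hsnil : s.takeWhile (fun d => d.isDigit || d = '.') = [] :=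
              tw_nil_of_prefix (tw_drop_nil rest) hpre
            have htw : ((rest.takeWhile (fun d => d.isDigit || d = '.')) ++ s).takeWhile
                (fun d => d.isDigit || d = '.') = rest.takeWhile (fun d => d.isDigit || d = '.') :=
              tw_append (p := fun d => d.isDigit || d = '.') _ s (fun a ha => List.mem_takeWhile_imp (p := fun d => d.isDigit || d = '.') ha) hsnil
            rw [aLoop, segsAux, if_neg h, if_neg h]
            simp only [List.nil_append, hcons]
            simp only [List.getLastD_eq_getLast?] at h0 hcur
            simp [hcur, h0, renderSegs_cons, ih _ hlen, reSub, hd, htw]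
          · -- code mode, plain character
            obtain ⟨s, S, h0, hcur, _⟩ := render_flush rest (some c) false [c]
            rw [aLoop, segsAux, if_neg h, if_neg h]
            simp [hcur, h0, renderSegs_cons, ih rest hr (some c) false, reSub, hd]

-- ===== VERDICT (by name: the statement is the Claim_ definition above) =====
theorem wrap_numbers_as_decimal_py_spec : Claim_equal_wrap_numbers_as_decimal_py := by
  intro expr _
  show _ = _
  unfold wrap_numbers_as_decimal_py wrap_numbers_as_decimal_py_alt
  rw [main_inv expr.toList.length expr.toList le_rfl]
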